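-- pv_equiv track=rewrite | github.com/RushanJi/Time-Calculator | Time Calculator.py | seconder
-- ===== SOURCE A (Python) =====
-- def seconder(day, month, year, hour, minute, second):
--     monthdays = [31, 28, 31, 30, 31, 30, 31, 31, 30, 31, 30, 31]
--     if (year % 4 == 0 and year % 100 != 0) or (year % 400 == 0):
--         monthdays[1] = 29
--
--     total_days = (year - 1) * 365 + (year - 1) // 4
--     for i in range(month - 1):
--         total_days += monthdays[i]
--
--     total_days += day - 1
--
--     total_seconds = total_days * 86400 + hour * 3600 + minute * 60 + second
--     return total_seconds
-- ===== SOURCE B (Python) =====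
-- _CUM = [0, 31, 59, 90, 120, 151, 181, 212, 243, 273, 304, 334, 365]
--
-- def seconder(day, month, year, hour, minute, second):
--     leap = (year % 4 == 0 and year % 100 != 0) or (year % 400 == 0)
--     total_days = (year - 1) * 365 + (year - 1) // 4 + (day - 1)
--     if month >= 2:
--         total_days += _CUM[month - 1]
--         if leap and month > 2:
--             total_days += 1
--     return total_days * 86400 + hour * 3600 + minute * 60 + second
-- ===== Notes on version B (the rewrite author's own statement) =====
-- stated objective: simpler
-- what changed: Replaces the per-month summing loop over a mutable month-length list with a single lookup in a constant cumulative-days table plus a leap-day correction for month > 2.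
import Mathlib
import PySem

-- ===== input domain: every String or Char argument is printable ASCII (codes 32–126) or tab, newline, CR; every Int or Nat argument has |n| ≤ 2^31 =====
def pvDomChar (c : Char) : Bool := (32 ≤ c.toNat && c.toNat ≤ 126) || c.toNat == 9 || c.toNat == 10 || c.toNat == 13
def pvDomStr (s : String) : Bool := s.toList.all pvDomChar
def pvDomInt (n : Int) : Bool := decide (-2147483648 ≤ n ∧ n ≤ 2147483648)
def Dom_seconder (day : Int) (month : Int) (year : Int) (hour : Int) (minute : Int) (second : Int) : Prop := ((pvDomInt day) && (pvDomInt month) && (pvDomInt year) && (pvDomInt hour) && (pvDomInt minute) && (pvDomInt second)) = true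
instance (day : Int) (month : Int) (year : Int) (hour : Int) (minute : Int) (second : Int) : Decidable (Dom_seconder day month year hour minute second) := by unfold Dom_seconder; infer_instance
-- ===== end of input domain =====

-- B replaces A's per-month summing loop with a constant cumulative-days table lookup plus a leap correction (simpler; same results wherever A returns, i.e. month ≤ 13).


-- ===== PORT A =====
-- Loop over the month-length list (Feb patched to 29 in leap years); exact port of A.
-- Out-of-range month (>= 14) raises IndexError in Python; Pre_ excludes it, getD 0 is unreachable inside Pre_.
def seconder (day : Int) (month : Int) (year : Int) (hour : Int) (minute : Int) (second : Int) : Int :=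
  let monthdays : List Int :=
    if (year % 4 == 0 && year % 100 != 0) || year % 400 == 0 then
      [31, 29, 31, 30, 31, 30, 31, 31, 30, 31, 30, 31]
    else
      [31, 28, 31, 30, 31, 30, 31, 31, 30, 31, 30, 31]
  let total_days := (year - 1) * 365 + PySem.Int.floordiv (year - 1) 4
  let total_days := (PySem.List.pyRange 0 (month - 1) 1).foldl
    (fun acc i => acc + (PySem.List.pyGet? monthdays i).getD 0) total_days
  let total_days := total_days + (day - 1)
  total_days * 86400 + hour * 3600 + minute * 60 + second

-- ===== PORT B =====
-- Constant cumulative month-days table; single lookup instead of a loop.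
def cumDays : List Int := [0, 31, 59, 90, 120, 151, 181, 212, 243, 273, 304, 334, 365]

def seconder_alt (day : Int) (month : Int) (year : Int) (hour : Int) (minute : Int) (second : Int) : Int :=
  let leap : Bool := (year % 4 == 0 && year % 100 != 0) || year % 400 == 0
  let total_days := (year - 1) * 365 + PySem.Int.floordiv (year - 1) 4 + (day - 1)
  let total_days :=
    if month ≥ 2 then
      total_days + (PySem.List.pyGet? cumDays (month - 1)).getD 0 +
        (if leap && month > 2 then 1 else 0)
    else total_days
  total_days * 86400 + hour * 3600 + minute * 60 + second

-- ===== PRECONDITION & SPEC =====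
-- Pre_ excludes month >= 14, exactly where Python A raises IndexError (list index out of range).
def Pre_seconder (day : Int) (month : Int) (year : Int) (hour : Int) (minute : Int) (second : Int) : Prop :=
  month ≤ 13
instance (day : Int) (month : Int) (year : Int) (hour : Int) (minute : Int) (second : Int) : Decidable (Pre_seconder day month year hour minute second) := by unfold Pre_seconder; infer_instance

def pvWitness_seconder : Int × Int × Int × Int × Int × Int := (15, 6, 2020, 10, 30, 45)

def Spec_seconder (day : Int) (month : Int) (year : Int) (hour : Int) (minute : Int) (second : Int) (out : Int) : Prop := out = seconder_alt day month year hour minute second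
instance (day : Int) (month : Int) (year : Int) (hour : Int) (minute : Int) (second : Int) (out : Int) : Decidable (Spec_seconder day month year hour minute second out) := by unfold Spec_seconder; infer_instance

-- ===== CLAIM (what is proved, stated in full; the proofs are below) =====
def Claim_equal_seconder : Prop := ∀ (day : Int) (month : Int) (year : Int) (hour : Int) (minute : Int) (second : Int), Dom_seconder day month year hour minute second → Pre_seconder day month year hour minute second → Spec_seconder day month year hour minute second (seconder day month year hour minute second)

-- ===== LEMMAS AND PROOFS =====
lemma pyRange_neg (a : Int) (h : a ≤ 0) : PySem.List.pyRange 0 a 1 = [] := by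
  simp [PySem.List.pyRange]
  omega

-- ===== VERDICT (by name: the statement is the Claim_ definition above) =====
theorem seconder_spec : Claim_equal_seconder := by
  intro day month year hour minute second hdom hpre
  unfold Spec_seconder seconder seconder_alt
  cases hc : ((year % 4 == 0 && year % 100 != 0) || year % 400 == 0) <;>
  · by_cases h1 : month ≤ 1
    · rw [pyRange_neg _ (by omega)]
      simp only [List.foldl_nil, if_neg (by omega : ¬ month ≥ 2)]
    · have h2 : 2 ≤ month := by omega
      have h13 : month ≤ 13 := hpre
      interval_cases month <;>
        norm_num [hc, cumDays, PySem.List.pyRange_one, Int.toNat, List.range_succ, List.foldl,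
          PySem.List.pyGet?, PySem.List.pyIdx?] <;> ring
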